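-- pv_equiv track=rewrite | github.com/nonpeera/IEEExtreme | Non/IDR.py | min_swaps_to_target
-- ===== SOURCE A (Python) =====
-- def min_swaps_to_target(arr, target):
--     swaps = 0
--     n = len(arr)
--
--     for i in range(n):
--         # ทำงานเฉพาะเมื่อ arr[i] ไม่ตรงกับ target[i]
--         while arr[i] != target[i]:
--             # สลับตัวเลขที่อยู่ติดกันไปข้างหน้าเพื่อให้ได้ลำดับที่ต้องการ
--             j = arr.index(target[i])
--             # สลับตัวที่อยู่ในตำแหน่ง i และ j
--             arr[j], arr[j - 1] = arr[j - 1], arr[j]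
--             swaps += 1
--
--     return swaps
-- ===== SOURCE B (Python) =====
-- def min_swaps_to_target(arr, target):
--     # Map each element to its first-occurrence position in target, then count
--     # inversion pairs of that sequence by merge sort. No mutation of arr
--     # (A rearranges arr in place), no swap simulation.
--     pos = {}
--     for k, v in enumerate(target):
--         if v not in pos:
--             pos[v] = k
--     s = [pos[v] for v in arr]
--
--     def sort_count(l):
--         if len(l) < 2:
--             return l, 0
--         m = len(l) // 2
--         left, a = sort_count(l[:m])
--         right, b = sort_count(l[m:])
--         merged = []
--         inv = a + b
--         i = j = 0
--         while i < len(left) and j < len(right):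
--             if left[i] <= right[j]:
--                 merged.append(left[i]); i += 1
--             else:
--                 merged.append(right[j]); j += 1
--                 inv += len(left) - i
--         merged.extend(left[i:]); merged.extend(right[j:])
--         return merged, inv
--
--     return sort_count(s)[1]
-- ===== Notes on version B (the rewrite author's own statement) =====
-- stated objective: alternative
-- what changed: Instead of simulating adjacent swaps on a mutated copy of arr (rescanning with .index inside a while loop), B maps each element once to its first-occurrence position in target via a dict and counts inversion pairs of that sequence with a merge sort; note A mutates arr in place while B does not (return-value equivalence only).
-- outside the precondition, e.g. on min_swaps_to_target([1, 1, 3, 2], [1, 3, 1, 2]): A returns 1, B returns 0; on min_swaps_to_target([2, 1, 1], [1, 1, 2]): A does not finish within the time limit, B returns 2; on min_swaps_to_target([1], [2]): A raises ValueError, B raises KeyError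
import Mathlib
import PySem

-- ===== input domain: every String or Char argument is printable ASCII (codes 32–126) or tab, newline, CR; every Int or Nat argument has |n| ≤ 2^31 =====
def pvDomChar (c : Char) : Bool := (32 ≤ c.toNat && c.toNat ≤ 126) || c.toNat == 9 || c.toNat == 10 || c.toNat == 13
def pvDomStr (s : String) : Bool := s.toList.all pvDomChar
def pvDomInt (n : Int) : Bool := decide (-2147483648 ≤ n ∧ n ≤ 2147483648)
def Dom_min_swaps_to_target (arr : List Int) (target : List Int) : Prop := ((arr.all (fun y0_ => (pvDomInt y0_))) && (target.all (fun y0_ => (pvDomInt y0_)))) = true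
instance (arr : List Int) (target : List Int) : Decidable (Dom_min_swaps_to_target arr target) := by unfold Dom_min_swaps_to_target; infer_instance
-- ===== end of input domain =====

-- B replaces A's in-place adjacent-swap simulation by mapping each element to its
-- first-occurrence position in target (a dict built in one pass) and counting
-- inversions of that sequence by merge sort; A mutates arr in place, B does not —
-- the equivalence proved here is about the return value only.

-- ===== PORT A =====
-- arr[j], arr[j-1] = arr[j-1], arr[j]  (Python: RHS read first, then the two writes;
-- negative index j-1 = -1 wraps to the last element, exactly as pySetD/pyGet? do)
def pySwapA (a : List Int) (j : Nat) : List Int :=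
  match PySem.List.pyGet? a ((j : Int) - 1), PySem.List.pyGet? a (j : Int) with
  | some x, some y => PySem.List.pySetD (PySem.List.pySetD a (j : Int) x) ((j : Int) - 1) y
  | _, _ => a      -- IndexError: unreachable (index? returned j < len a)

-- the inner 'while arr[i] != target[i]' loop; fuel bounds the iterations (under
-- Pre_ the loop performs at most (index of t) ≤ len a - 1 swaps, see inner_move)
def innerA (t : Int) (i : Nat) : Nat → List Int × Int → List Int × Int
  | 0, st => st
  | f + 1, (a, sw) =>
    if PySem.List.pyGet? a (i : Int) ≠ some t then
      match PySem.List.index? a t with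
      | some j => innerA t i f (pySwapA a j, sw + 1)
      | none => (a, sw)      -- ValueError from arr.index: unreachable under Pre_
    else (a, sw)

-- 'for i in range(n)' as structural recursion over the index list
def outerA (target : List Int) : List Nat → List Int × Int → List Int × Int
  | [], st => st
  | i :: is, (a, sw) =>
    match PySem.List.pyGet? target (i : Int) with
    | some t => outerA target is (innerA t i (a.length + 1) (a, sw))
    | none => (a, sw)        -- IndexError on target[i]: unreachable under Pre_

def min_swaps_to_target (arr : List Int) (target : List Int) : Int :=
  (outerA target (List.range arr.length) (arr, 0)).2

-- ===== PORT B =====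
-- 'pos = {}; for k, v in enumerate(target): if v not in pos: pos[v] = k'
def buildPos (target : List Int) : PySem.Dict Int Int :=
  (PySem.List.enumerate target 0).foldl
    (fun d kv => if d.contains kv.2 then d else d.insert kv.2 kv.1) PySem.Dict.empty

-- pos[v] (KeyError → default 0; unreachable under Pre_: every v of arr is in target)
def posOf (pos : PySem.Dict Int Int) (v : Int) : Int := (pos.get? v).getD 0

-- the merge loop of sort_count: merge two runs, adding len(left) - i whenever an
-- element is taken from the right run
def mergeCount : List Int → List Int → List Int × Int
  | [], r => (r, 0)
  | x :: l, [] => (x :: l, 0)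
  | x :: l, y :: r =>
    if x ≤ y then
      let p := mergeCount l (y :: r)
      (x :: p.1, p.2)
    else
      let p := mergeCount (x :: l) r
      (y :: p.1, p.2 + ((x :: l).length : Int))
termination_by l r => l.length + r.length
decreasing_by all_goals (simp; try omega)

-- 'def sort_count(l): …' (recursive merge sort returning (sorted run, inversions))
def sortCount (l : List Int) : List Int × Int :=
  if l.length < 2 then (l, 0)
  else
    let m := l.length / 2
    let p := sortCount (l.take m)
    let q := sortCount (l.drop m)
    let r := mergeCount p.1 q.1
    (r.1, p.2 + q.2 + r.2)
termination_by l.length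
decreasing_by all_goals (simp; try omega)

def min_swaps_to_target_alt (arr : List Int) (target : List Int) : Int :=
  (sortCount (arr.map (posOf (buildPos target)))).2

-- ===== PRECONDITION & SPEC =====
-- Pre_ requires arr to be duplicate-free and a permutation of the first
-- len(arr) elements of target (A never reads a longer tail of target); on
-- non-permutation inputs A raises ValueError/IndexError, and with duplicates
-- arr.index(target[i]) may find an occurrence before position i, so A loops
-- forever on some such inputs and returns accidental counts on others.
def Pre_min_swaps_to_target (arr : List Int) (target : List Int) : Prop :=
  arr.Nodup ∧ arr.Perm (target.take arr.length)
instance (arr : List Int) (target : List Int) : Decidable (Pre_min_swaps_to_target arr target) := by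
  unfold Pre_min_swaps_to_target; infer_instance

def pvWitness_min_swaps_to_target : List Int × List Int := ([2, 1, 3], [1, 3, 2])

def Spec_min_swaps_to_target (arr : List Int) (target : List Int) (out : Int) : Prop := out = min_swaps_to_target_alt arr target
instance (arr : List Int) (target : List Int) (out : Int) : Decidable (Spec_min_swaps_to_target arr target out) := by unfold Spec_min_swaps_to_target; infer_instance

-- ===== CLAIM (what is proved, stated in full; the proofs are below) =====
def Claim_equal_min_swaps_to_target : Prop := ∀ (arr : List Int) (target : List Int), Dom_min_swaps_to_target arr target → Pre_min_swaps_to_target arr target → Spec_min_swaps_to_target arr target (min_swaps_to_target arr target)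

-- ===== LEMMAS AND PROOFS =====

-- proof-side spec of buildPos lookups: the first-occurrence index of v in target
def posInTarget (target : List Int) (v : Int) : Int :=
  match PySem.List.index? target v with
  | some k => (k : Int)
  | none => 0

-- proof-side spec of sortCount's count: the number of inversion pairs
def invCount : List Int → Int
  | [] => 0
  | h :: s => ((s.countP (fun y => decide (y < h)) : Nat) : Int) + invCount s

-- abstract description of A under Pre_: extract target's elements one by one,
-- adding the index at which each is found in what remains of arr
def goA : List Int → List Int → Int
  | _, [] => 0
  | rem, t :: ts => (((PySem.List.index? rem t).getD 0 : Nat) : Int) + goA (rem.erase t) ts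

lemma pyGet?_append_head (pre ys : List Int) :
    PySem.List.pyGet? (pre ++ ys) (pre.length : Int) = ys[0]? := by
  rw [PySem.List.pyGet?_natCast]
  simp [List.getElem?_append_right]

lemma set_append_len (xs ys : List Int) (y v : Int) :
    (xs ++ y :: ys).set xs.length v = xs ++ v :: ys := by
  induction xs with
  | nil => simp
  | cons x xs ih => simp [ih]

lemma inner_move (u : List Int) : ∀ (pre w : List Int) (t : Int) (sw : Int) (f : Nat),
    t ∉ pre → t ∉ u → u.length < f →
    innerA t pre.length f (pre ++ (u ++ t :: w), sw) = (pre ++ t :: (u ++ w), sw + (u.length : Int)) := by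
  induction u using List.reverseRecOn with
  | nil =>
    intro pre w t sw f _ _ hf
    obtain ⟨f', rfl⟩ : ∃ f', f = f' + 1 := ⟨f - 1, by omega⟩
    simp [innerA]
  | append_singleton u' b ih =>
    intro pre w t sw f hpre hu hf
    obtain ⟨f', rfl⟩ : ∃ f', f = f' + 1 := ⟨f - 1, by omega⟩
    have htu' : t ∉ u' := fun h => hu (by simp [h])
    have htb : t ≠ b := fun h => hu (by simp [h])
    -- the guard: arr[i] is the head of u' ++ [b] ++ t :: w, which is not t
    have hhead : PySem.List.pyGet? (pre ++ ((u' ++ [b]) ++ t :: w)) (pre.length : Int) ≠ some t := by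
      rw [pyGet?_append_head]
      rcases u' with _ | ⟨x, xs⟩
      · simpa using fun h => htb h.symm
      · simpa using fun h => htu' (by simp [h])
    -- j = arr.index(t) = (pre ++ u' ++ [b]).length
    have hidx : PySem.List.index? (pre ++ ((u' ++ [b]) ++ t :: w)) t
        = some (pre ++ (u' ++ [b])).length := by
      rw [PySem.List.index?_eq_some_iff]
      exact ⟨pre ++ (u' ++ [b]), w, by simp, rfl, by
        simp only [List.mem_append, List.mem_singleton]
        rintro (h | h | h)
        · exact hpre h
        · exact htu' h
        · exact htb h⟩
    have hswap : pySwapA (pre ++ ((u' ++ [b]) ++ t :: w)) (pre ++ (u' ++ [b])).length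
        = pre ++ (u' ++ t :: b :: w) := by
      unfold pySwapA
      have e1 : pre ++ ((u' ++ [b]) ++ t :: w) = (pre ++ (u' ++ [b])) ++ t :: w := by simp
      have e2 : pre ++ ((u' ++ [b]) ++ t :: w) = (pre ++ u') ++ b :: (t :: w) := by simp
      have elen : (((pre ++ (u' ++ [b])).length : Int) - 1) = ((pre ++ u').length : Int) := by
        simp; omega
      have hset1 : PySem.List.pySetD ((pre ++ u') ++ b :: (t :: w))
          (((pre ++ (u' ++ [b])).length : Int)) b = (pre ++ u') ++ b :: (b :: w) := by
        rw [PySem.List.pySetD_natCast, ← e2, e1, set_append_len]; simp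
      have hset2 : PySem.List.pySetD ((pre ++ u') ++ b :: (b :: w))
          (((pre ++ u').length : Int)) t = pre ++ (u' ++ t :: b :: w) := by
        rw [PySem.List.pySetD_natCast, set_append_len]; simp
      rw [e1, PySem.List.pyGet?_append_length, elen, ← e1, e2, PySem.List.pyGet?_append_length]
      dsimp only
      rw [hset1, hset2]
    rw [innerA, if_pos hhead, hidx]
    dsimp only
    rw [hswap, ih pre (b :: w) t (sw + 1) f' hpre htu' (by simp at hf ⊢; omega)]
    rw [Prod.mk.injEq]
    exact ⟨by simp, by simp; ring⟩

lemma outer_loop : ∀ (ts rem pre extra : List Int) (sw : Int),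
    rem.Perm ts → (pre ++ rem).Nodup →
    outerA (pre ++ (ts ++ extra)) (List.range' pre.length rem.length) (pre ++ rem, sw)
      = (pre ++ ts, sw + goA rem ts) := by
  intro ts
  induction ts with
  | nil =>
    intro rem pre extra sw hperm _
    have : rem = [] := hperm.eq_nil
    subst this
    simp [outerA, goA]
  | cons t ts' ih =>
    intro rem pre extra sw hperm hnd
    have ht : t ∈ rem := hperm.mem_iff.mpr (by simp)
    obtain ⟨u, w, rfl⟩ := List.append_of_mem ht
    have htpre : t ∉ pre := by
      intro h
      exact (List.nodup_append.mp hnd).2.2 t h t (by simp) rfl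
    have htu : t ∉ u := by
      intro h
      exact (List.nodup_append.mp (List.nodup_append.mp hnd).2.1).2.2 t h t (by simp) rfl
    have hlen : (u ++ t :: w).length = (u ++ w).length + 1 := by simp; omega
    rw [hlen, List.range'_succ, outerA]
    have hget : PySem.List.pyGet? (pre ++ t :: (ts' ++ extra)) (pre.length : Int) = some t :=
      PySem.List.pyGet?_append_length pre (ts' ++ extra) t
    simp only [List.cons_append]
    simp only [hget]
    have hfuel : u.length < (pre ++ (u ++ t :: w)).length + 1 := by simp; omega
    rw [inner_move u pre w t sw _ htpre htu hfuel]
    have hperm2 : (pre ++ (u ++ t :: w)).Perm ((pre ++ [t]) ++ (u ++ w)) := by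
      have h1 : (pre ++ (u ++ t :: w)).Perm (pre ++ t :: (u ++ w)) :=
        List.Perm.append_left pre List.perm_middle
      simpa using h1
    have hnd2 : ((pre ++ [t]) ++ (u ++ w)).Nodup := hperm2.nodup_iff.mp hnd
    have hperm3 : (u ++ w).Perm ts' := by
      have h1 : (t :: (u ++ w)).Perm (t :: ts') := (List.perm_middle.symm).trans hperm
      exact (List.perm_cons t).mp h1
    have := ih (u ++ w) (pre ++ [t]) extra (sw + (u.length : Int)) hperm3 hnd2
    have elen : (pre ++ [t]).length = pre.length + 1 := by simp
    rw [elen] at this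
    simp only [List.append_assoc, List.singleton_append] at this
    rw [this]
    have hidx : PySem.List.index? (u ++ t :: w) t = some u.length := by
      rw [PySem.List.index?_eq_some_iff]
      exact ⟨u, w, rfl, rfl, htu⟩
    have herase : (u ++ t :: w).erase t = u ++ w := by
      rw [List.erase_append_right _ htu, List.erase_cons_head]
    rw [goA, hidx, herase, Prod.mk.injEq]
    exact ⟨by simp, by simp; ring⟩

lemma portA_eq_goA (arr target : List Int) (hnd : arr.Nodup)
    (hp : arr.Perm (target.take arr.length)) :
    min_swaps_to_target arr target = goA arr (target.take arr.length) := by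
  unfold min_swaps_to_target
  have := outer_loop (target.take arr.length) arr [] (target.drop arr.length) 0 hp
    (by simpa using hnd)
  rw [List.range_eq_range']
  simp only [List.nil_append, List.length_nil] at this
  rw [List.take_append_drop] at this
  rw [this]
  simp

-- extracting the f-minimal element t of rem costs exactly its index in inversions
lemma invCount_extract : ∀ (rem : List Int) (t : Int) (f : Int → Int),
    t ∈ rem → rem.Nodup → (∀ v ∈ rem, v ≠ t → f t < f v) →
    invCount (rem.map f)
      = (((PySem.List.index? rem t).getD 0 : Nat) : Int) + invCount ((rem.erase t).map f) := by
  intro rem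
  induction rem with
  | nil => intro t f h; simp at h
  | cons r rs ih =>
    intro t f hmem hnd hmin
    by_cases hrt : r = t
    · subst hrt
      rw [PySem.List.index?_cons_self, List.erase_cons_head]
      have hzero : (rs.map f).countP (fun y => decide (y < f r)) = 0 := by
        rw [List.countP_eq_zero]
        intro y hy
        simp only [List.mem_map] at hy
        obtain ⟨v, hv, rfl⟩ := hy
        have : v ≠ r := fun h => (List.nodup_cons.mp hnd).1 (h ▸ hv)
        simp [not_lt.mpr (le_of_lt (hmin v (by simp [hv]) this))]
      simp [invCount, hzero]
    · have htrs : t ∈ rs := by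
        rcases List.mem_cons.mp hmem with h | h
        · exact absurd h.symm hrt
        · exact h
      obtain ⟨k, hk⟩ := Option.isSome_iff_exists.mp ((PySem.List.index?_isSome_iff rs t).mpr htrs)
      have hidx : PySem.List.index? (r :: rs) t = some (k + 1) := by
        rw [PySem.List.index?_cons_of_ne rs hrt, hk]; rfl
      have hndrs : rs.Nodup := (List.nodup_cons.mp hnd).2
      have ihh := ih t f htrs hndrs (fun v hv hvt => hmin v (by simp [hv]) hvt)
      rw [hk] at ihh
      have hpc : (rs.map f).countP (fun y => decide (y < f r))
          = ((rs.erase t).map f).countP (fun y => decide (y < f r)) + 1 := by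
        have hp : (rs.map f).Perm (f t :: ((rs.erase t).map f)) := by
          have := (List.perm_cons_erase htrs).map f
          simpa using this
        rw [hp.countP_eq]
        have : f t < f r := hmin r (by simp) hrt
        simp [this]
      have herase : (r :: rs).erase t = r :: rs.erase t :=
        List.erase_cons_tail (by simp [hrt])
      rw [hidx, herase]
      simp only [invCount, List.map_cons, Option.getD_some] at ihh ⊢
      rw [hpc, ihh]
      push_cast
      ring

lemma goA_eq_invCount : ∀ (ts rem : List Int) (f : Int → Int),
    rem.Perm ts → List.Pairwise (fun a b => f a < f b) ts →
    goA rem ts = invCount (rem.map f) := by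
  intro ts
  induction ts with
  | nil =>
    intro rem f hperm _
    have : rem = [] := hperm.eq_nil
    subst this
    simp [goA, invCount]
  | cons t ts' ih =>
    intro rem f hperm hpw
    have hts'min : ∀ v ∈ ts', f t < f v := (List.pairwise_cons.mp hpw).1
    have hpw' : List.Pairwise (fun a b => f a < f b) ts' := (List.pairwise_cons.mp hpw).2
    have hndts : (t :: ts').Nodup :=
      hpw.imp (fun {a b} h => fun e => absurd (e ▸ h) (lt_irrefl _))
    have hnd : rem.Nodup := hperm.nodup_iff.mpr hndts
    have ht : t ∈ rem := hperm.mem_iff.mpr (by simp)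
    have hmin : ∀ v ∈ rem, v ≠ t → f t < f v := by
      intro v hv hvt
      have : v ∈ t :: ts' := hperm.mem_iff.mp hv
      rcases List.mem_cons.mp this with h | h
      · exact absurd h hvt
      · exact hts'min v h
    have hperm' : (rem.erase t).Perm ts' := by
      have h1 := hperm.erase t
      simpa using h1
    rw [goA, ih (rem.erase t) f hperm' hpw', invCount_extract rem t f ht hnd hmin]

lemma pos_getElem (target : List Int) (hnd : target.Nodup) (i : Nat) (hi : i < target.length) :
    posInTarget target target[i] = (i : Int) := by
  have hsplit : target = target.take i ++ target[i] :: target.drop (i + 1) := by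
    conv_lhs => rw [← List.take_append_drop i target]
    rw [List.drop_eq_getElem_cons hi]
  have hnmem : target[i] ∉ target.take i := by
    intro h
    rw [hsplit] at hnd
    rcases List.nodup_append.mp hnd with ⟨_, h2, h3⟩
    exact h3 _ h _ List.mem_cons_self rfl
  have hidx : PySem.List.index? target target[i] = some i := by
    rw [PySem.List.index?_eq_some_iff]
    exact ⟨target.take i, target.drop (i + 1), hsplit, by simp [Nat.le_of_lt hi], hnmem⟩
  unfold posInTarget
  rw [hidx]

lemma pairwise_pos (target : List Int) (hnd : target.Nodup) :
    List.Pairwise (fun a b => posInTarget target a < posInTarget target b) target := by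
  rw [List.pairwise_iff_getElem]
  intro i j hi hj hij
  rw [pos_getElem target hnd i hi, pos_getElem target hnd j hj]
  exact_mod_cast hij

lemma posInTarget_take (target : List Int) (n : Nat) (v : Int) (hv : v ∈ target.take n) :
    posInTarget target v = posInTarget (target.take n) v := by
  have h := PySem.List.index?_append_of_mem (target.drop n) hv
  rw [List.take_append_drop] at h
  unfold posInTarget
  rw [h]

lemma pairwise_pos_take (target : List Int) (n : Nat) (hnd : (target.take n).Nodup) :
    List.Pairwise (fun a b => posInTarget target a < posInTarget target b) (target.take n) := by
  refine List.Pairwise.imp_of_mem ?_ (pairwise_pos (target.take n) hnd)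
  intro a b ha hb hab
  rw [posInTarget_take target n a ha, posInTarget_take target n b hb]
  exact hab

-- the dict loop of buildPos keeps the FIRST index written for every key
lemma buildPos_aux (ts : List Int) : ∀ (k : Int) (d : PySem.Dict Int Int) (v : Int),
    ((PySem.List.enumerate ts k).foldl
        (fun d kv => if d.contains kv.2 then d else d.insert kv.2 kv.1) d).get? v
      = match d.get? v with
        | some x => some x
        | none => (PySem.List.index? ts v).map (fun j => k + (j : Int)) := by
  induction ts with
  | nil =>
    intro k d v
    rw [PySem.List.enumerate_nil, List.foldl_nil]
    cases d.get? v <;> simp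
  | cons t ts' ih =>
    intro k d v
    rw [PySem.List.enumerate_cons, List.foldl_cons]
    by_cases hct : d.contains t = true
    · simp only [hct, if_true]
      rw [ih (k + 1)]
      cases hv : d.get? v with
      | some x => rfl
      | none =>
        have hvt : v ≠ t := by
          rintro rfl
          rw [PySem.Dict.contains_eq_isSome_get?, hv] at hct
          simp at hct
        rw [PySem.List.index?_cons_of_ne ts' (Ne.symm hvt)]
        cases PySem.List.index? ts' v <;> simp
        push_cast
        ring
    · simp only [hct, Bool.false_eq_true, if_false]
      rw [ih (k + 1)]
      by_cases hvt : v = t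
      · subst hvt
        have hv : d.get? v = none := by
          rw [PySem.Dict.contains_eq_isSome_get?] at hct
          simpa using hct
        rw [PySem.Dict.get?_insert_self, hv, PySem.List.index?_cons_self]
        simp
      · rw [PySem.Dict.get?_insert, if_neg hvt]
        cases hv : d.get? v with
        | some x => rfl
        | none =>
          rw [PySem.List.index?_cons_of_ne ts' (Ne.symm hvt)]
          cases PySem.List.index? ts' v <;> simp
          push_cast
          ring

lemma posOf_buildPos (target : List Int) (v : Int) :
    posOf (buildPos target) v = posInTarget target v := by
  unfold posOf posInTarget buildPos
  rw [buildPos_aux]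
  rw [PySem.Dict.get?_empty]
  cases PySem.List.index? target v <;> simp

-- number of pairs (x from l, y from r) with y < x
def crossCount (l r : List Int) : Int :=
  (l.map (fun x => ((r.countP (fun y => decide (y < x)) : Nat) : Int))).sum

lemma crossCount_nil_left (r : List Int) : crossCount [] r = 0 := by simp [crossCount]

lemma crossCount_nil_right (l : List Int) : crossCount l [] = 0 := by simp [crossCount]

lemma crossCount_cons_left (x : Int) (l r : List Int) :
    crossCount (x :: l) r
      = ((r.countP (fun y => decide (y < x)) : Nat) : Int) + crossCount l r := by
  simp [crossCount]

lemma invCount_append (l r : List Int) :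
    invCount (l ++ r) = invCount l + invCount r + crossCount l r := by
  induction l with
  | nil => simp [invCount, crossCount_nil_left]
  | cons x l ih =>
    simp only [List.cons_append, invCount, List.countP_append, crossCount_cons_left, ih]
    push_cast
    ring

lemma crossCount_perm_left (r : List Int) {l₁ l₂ : List Int} (h : l₁.Perm l₂) :
    crossCount l₁ r = crossCount l₂ r :=
  List.Perm.sum_eq (h.map _)

lemma crossCount_perm_right (l : List Int) {r₁ r₂ : List Int} (h : r₁.Perm r₂) :
    crossCount l r₁ = crossCount l r₂ := by
  unfold crossCount
  congr 1
  exact List.map_congr_left (fun x _ => by rw [h.countP_eq])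

lemma mergeCount_spec : ∀ (l r : List Int), List.Pairwise (· ≤ ·) l → List.Pairwise (· ≤ ·) r →
    (mergeCount l r).1.Perm (l ++ r) ∧ List.Pairwise (· ≤ ·) (mergeCount l r).1 ∧
      (mergeCount l r).2 = crossCount l r := by
  intro l r
  induction l, r using mergeCount.induct with
  | case1 r =>
    intro _ hr
    simp only [mergeCount]
    exact ⟨List.Perm.refl r, hr, (crossCount_nil_left r).symm⟩
  | case2 x l =>
    intro hl _
    simp only [mergeCount]
    exact ⟨by simp, hl, (crossCount_nil_right (x :: l)).symm⟩
  | case3 x l y r hxy ih =>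
    intro hl hr
    obtain ⟨hp, hs, hc⟩ := ih hl.of_cons hr
    simp only [mergeCount, if_pos hxy]
    refine ⟨?_, ?_, ?_⟩
    · exact (hp.cons x).trans (by simp)
    · rw [List.pairwise_cons]
      refine ⟨?_, hs⟩
      intro b hb
      rcases (List.mem_append.mp (hp.mem_iff.mp hb)) with h | h
      · exact List.rel_of_pairwise_cons hl h
      · rcases List.mem_cons.mp h with h | h
        · exact h ▸ hxy
        · exact le_trans hxy (List.rel_of_pairwise_cons hr h)
    · rw [hc, crossCount_cons_left]
      have : (y :: r).countP (fun z => decide (z < x)) = 0 := by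
        rw [List.countP_eq_zero]
        intro z hz
        rcases List.mem_cons.mp hz with h | h
        · simp [h, not_lt.mpr hxy]
        · simp [not_lt.mpr (le_trans hxy (List.rel_of_pairwise_cons hr h))]
      rw [this]
      simp
  | case4 x l y r hxy ih =>
    intro hl hr
    have hyx : y < x := lt_of_not_ge hxy
    obtain ⟨hp, hs, hc⟩ := ih hl hr.of_cons
    simp only [mergeCount, if_neg hxy]
    refine ⟨?_, ?_, ?_⟩
    · exact (hp.cons y).trans List.perm_middle.symm
    · rw [List.pairwise_cons]
      refine ⟨?_, hs⟩
      intro b hb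
      rcases (List.mem_append.mp (hp.mem_iff.mp hb)) with h | h
      · rcases List.mem_cons.mp h with h | h
        · exact h ▸ le_of_lt hyx
        · exact le_trans (le_of_lt hyx) (List.rel_of_pairwise_cons hl h)
      · exact List.rel_of_pairwise_cons hr h
    · rw [hc]
      have hall : ∀ z ∈ x :: l,
          ((y :: r).countP (fun w => decide (w < z)) : Int)
            = (r.countP (fun w => decide (w < z)) : Int) + 1 := by
        intro z hz
        have hyz : y < z := by
          rcases List.mem_cons.mp hz with h | h
          · exact h ▸ hyx
          · exact lt_of_lt_of_le hyx (List.rel_of_pairwise_cons hl h)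
        rw [List.countP_cons]
        simp [hyz]
      unfold crossCount
      rw [List.map_congr_left (fun z hz => hall z hz)]
      have : ((x :: l).map (fun z => (r.countP (fun w => decide (w < z)) : Int) + 1)).sum
          = ((x :: l).map (fun z => (r.countP (fun w => decide (w < z)) : Int))).sum
            + ((x :: l).length : Int) := by
        induction (x :: l) with
        | nil => simp
        | cons a as ihh => simp [ihh]; try (push_cast; ring)
      rw [this]

lemma sortCount_spec : ∀ (l : List Int),
    (sortCount l).1.Perm l ∧ List.Pairwise (· ≤ ·) (sortCount l).1 ∧
      (sortCount l).2 = invCount l := by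
  intro l
  induction l using sortCount.induct with
  | case1 l h =>
    rw [sortCount, if_pos h]
    refine ⟨List.Perm.refl l, ?_, ?_⟩
    · rcases l with _ | ⟨a, _ | ⟨b, t⟩⟩
      · simp
      · simp
      · simp at h
    · rcases l with _ | ⟨a, _ | ⟨b, t⟩⟩
      · simp [invCount]
      · simp [invCount]
      · simp at h
  | case2 l h m ih1 ih2 =>
    have hm : m = l.length / 2 := rfl
    clear_value m
    subst hm
    rw [sortCount, if_neg h]
    dsimp only
    obtain ⟨hp1, hs1, hc1⟩ := ih1
    obtain ⟨hp2, hs2, hc2⟩ := ih2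
    obtain ⟨mp, ms, mc⟩ := mergeCount_spec _ _ hs1 hs2
    refine ⟨?_, ms, ?_⟩
    · refine mp.trans ((hp1.append hp2).trans ?_)
      rw [List.take_append_drop]
    · rw [mc, crossCount_perm_left _ hp1, crossCount_perm_right _ hp2, hc1, hc2]
      have := invCount_append (l.take (l.length / 2)) (l.drop (l.length / 2))
      rw [List.take_append_drop] at this
      rw [this]

lemma alt_eq_invCount (arr target : List Int) :
    min_swaps_to_target_alt arr target = invCount (arr.map (posInTarget target)) := by
  unfold min_swaps_to_target_alt
  rw [List.map_congr_left (fun v _ => posOf_buildPos target v)]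
  exact (sortCount_spec _).2.2

-- ===== VERDICT (by name: the statement is the Claim_ definition above) =====
theorem min_swaps_to_target_spec : Claim_equal_min_swaps_to_target := by
  unfold Claim_equal_min_swaps_to_target
  intro arr target _ hpre
  obtain ⟨hnd, hperm⟩ := hpre
  unfold Spec_min_swaps_to_target
  rw [portA_eq_goA arr target hnd hperm, alt_eq_invCount]
  exact goA_eq_invCount (target.take arr.length) arr (posInTarget target) hperm
    (pairwise_pos_take target arr.length (hperm.nodup_iff.mp hnd))
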